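-- pv_equiv track=rewrite | github.com/DarthEmpty/AdventOfCode2022 | 16/solution.py | apply_ticks
-- ===== SOURCE A (Python) =====
-- from typing import List, Tuple, Dict, Union
--
-- def apply_ticks(
--     duration: int,
--     time_left: int,
--     accumulated: int,
--     new_value: int,
--     history: List[int]
-- ) -> Tuple[int, int, List[int]]:
--
--     for _ in range(duration):
--         if time_left <= 0:
--             return time_left, accumulated, history
--         else:
--             time_left -= 1
--
--         if not history:
--             history = [0]
--         else:
--             history.append(accumulated)
--
--     return time_left, accumulated + new_value, history
-- ===== SOURCE B (Python) =====
-- from typing import List, Tuple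
--
--
-- def apply_ticks(
--     duration: int,
--     time_left: int,
--     accumulated: int,
--     new_value: int,
--     history: List[int]
-- ) -> Tuple[int, int, List[int]]:
--     # number of effective ticks, computed directly instead of looping
--     k = max(0, min(duration, time_left))
--
--     if k > 0:
--         if history:
--             history.extend([accumulated] * k)   # same in-place mutation as the loop
--         else:
--             history = [0] + [accumulated] * (k - 1)
--
--     if duration <= 0 or k == duration:
--         return time_left - k, accumulated + new_value, history
--     return time_left - k, accumulated, history
-- ===== Notes on version B (the rewrite author's own statement) =====
-- stated objective: simpler
-- what changed: Replaces the per-tick loop with a closed-form tick count k = max(0, min(duration, time_left)) and builds the final history in one step (extend by k copies, or [0] plus k-1 copies when it starts empty), preserving A's in-place mutation of a non-empty history.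
import Mathlib
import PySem

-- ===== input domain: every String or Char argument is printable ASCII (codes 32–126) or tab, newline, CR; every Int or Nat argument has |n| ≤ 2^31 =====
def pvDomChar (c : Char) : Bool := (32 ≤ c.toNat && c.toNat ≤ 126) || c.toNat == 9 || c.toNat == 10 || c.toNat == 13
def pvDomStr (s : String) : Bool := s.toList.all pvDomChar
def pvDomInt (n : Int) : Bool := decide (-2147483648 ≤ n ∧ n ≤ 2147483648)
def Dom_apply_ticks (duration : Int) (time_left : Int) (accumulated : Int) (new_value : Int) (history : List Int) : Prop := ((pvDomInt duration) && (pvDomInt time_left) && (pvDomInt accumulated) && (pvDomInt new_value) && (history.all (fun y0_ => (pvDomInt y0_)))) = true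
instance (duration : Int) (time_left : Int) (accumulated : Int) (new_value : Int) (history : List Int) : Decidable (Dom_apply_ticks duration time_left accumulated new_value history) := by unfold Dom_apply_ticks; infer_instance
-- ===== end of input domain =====

-- B replaces A's per-tick loop by a closed-form tick count k = max(0, min(duration, time_left)); simpler, no loop.
-- A mutates a non-empty `history` in place; B performs the same mutation (extend by k copies), so side effects match too.


-- ===== PORT A =====
-- the `for _ in range(duration)` loop; Bool = loop ran to completion (no early return)
def applyTicksLoop (n : Nat) (time_left accumulated : Int) (history : List Int) : Bool × Int × List Int :=
  match n with
  | 0 => (true, time_left, history)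
  | n + 1 =>
    if time_left ≤ 0 then (false, time_left, history)
    else applyTicksLoop n (time_left - 1) accumulated
      (if history = [] then [0] else history ++ [accumulated])

def apply_ticks (duration : Int) (time_left : Int) (accumulated : Int) (new_value : Int) (history : List Int) : Int × Int × List Int :=
  match applyTicksLoop duration.toNat time_left accumulated history with
  | (true, tl, h) => (tl, accumulated + new_value, h)
  | (false, tl, h) => (tl, accumulated, h)

-- ===== PORT B =====
def apply_ticks_alt (duration : Int) (time_left : Int) (accumulated : Int) (new_value : Int) (history : List Int) : Int × Int × List Int :=
  let k : Int := max 0 (min duration time_left)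
  let hist : List Int :=
    if k > 0 then
      if history ≠ [] then history ++ List.replicate k.toNat accumulated
      else 0 :: List.replicate (k - 1).toNat accumulated
    else history
  if duration ≤ 0 ∨ k = duration then (time_left - k, accumulated + new_value, hist)
  else (time_left - k, accumulated, hist)

-- ===== PRECONDITION & SPEC =====
def Spec_apply_ticks (duration : Int) (time_left : Int) (accumulated : Int) (new_value : Int) (history : List Int) (out : Int × Int × List Int) : Prop := out = apply_ticks_alt duration time_left accumulated new_value history
instance (duration : Int) (time_left : Int) (accumulated : Int) (new_value : Int) (history : List Int) (out : Int × Int × List Int) : Decidable (Spec_apply_ticks duration time_left accumulated new_value history out) := by unfold Spec_apply_ticks; infer_instance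

-- ===== CLAIM (what is proved, stated in full; the proofs are below) =====
def Claim_equal_apply_ticks : Prop := ∀ (duration : Int) (time_left : Int) (accumulated : Int) (new_value : Int) (history : List Int), Dom_apply_ticks duration time_left accumulated new_value history → Spec_apply_ticks duration time_left accumulated new_value history (apply_ticks duration time_left accumulated new_value history)

-- ===== LEMMAS AND PROOFS =====

-- closed-form characterisation of A's loop: k = min n (time_left⁺) ticks happen
theorem applyTicksLoop_spec (n : Nat) (tl acc : Int) (h : List Int) :
    applyTicksLoop n tl acc h =
      (decide (min n (max tl 0).toNat = n), tl - (min n (max tl 0).toNat : Nat),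
        if min n (max tl 0).toNat = 0 then h
        else if h = [] then 0 :: List.replicate (min n (max tl 0).toNat - 1) acc
        else h ++ List.replicate (min n (max tl 0).toNat) acc) := by
  induction n generalizing tl h with
  | zero => simp [applyTicksLoop]
  | succ n ih =>
    by_cases htl : tl ≤ 0
    · have h0 : min (n + 1) (max tl 0).toNat = 0 := by omega
      simp [applyTicksLoop, htl, h0]
    · have hk : min (n + 1) (max tl 0).toNat = min n (max (tl - 1) 0).toNat + 1 := by omega
      rw [applyTicksLoop, if_neg htl, ih]
      set k' : Nat := min n (max (tl - 1) 0).toNat with hk'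
      have hdec : (decide (k' = n)) = (decide (min (n + 1) (max tl 0).toNat = n + 1)) := by
        simp only [decide_eq_decide]; omega
      refine Prod.ext ?_ (Prod.ext ?_ ?_)
      · simp only [hk, decide_eq_decide]; omega
      · simp only [hk]; push_cast; ring
      · simp only [hk, Nat.add_eq_zero, Nat.add_sub_cancel, and_false, reduceIte]
        by_cases hh : h = [] <;> by_cases hk0 : k' = 0 <;>
          simp [hh, hk0, List.replicate_succ, List.replicate_succ', List.append_assoc]
theorem apply_ticks_spec : Claim_equal_apply_ticks := by
  intro duration tl acc nv h _
  unfold Spec_apply_ticks apply_ticks apply_ticks_alt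
  rw [applyTicksLoop_spec]
  set kN : Nat := min duration.toNat (max tl 0).toNat with hkN
  have hk : max 0 (min duration tl) = (kN : Int) := by omega
  simp only [← hk]
  set k : Int := max 0 (min duration tl) with hkdef
  have hknn : 0 ≤ k := by omega
  by_cases hdone : kN = duration.toNat
  · have hcond : duration ≤ 0 ∨ k = duration := by omega
    simp only [hdone, decide_eq_true_eq, if_pos rfl, if_pos hcond]
    by_cases hk0 : k > 0
    · have hkN0 : ¬ (duration.toNat = 0) := by omega
      have h1 : (duration.toNat : Int) = k := by omega
      have h2 : duration.toNat - 1 = (k - 1).toNat := by omega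
      have h3 : duration.toNat = k.toNat := by omega
      by_cases hh : h = [] <;> simp [hh, hk0, hkN0, h1, h2, h3]
    · have hkN0 : duration.toNat = 0 := by omega
      simp [hkN0, hk0]
  · have hcond : ¬ (duration ≤ 0 ∨ k = duration) := by omega
    have hfalse : (decide (kN = duration.toNat)) = Bool.false := by
      simp only [decide_eq_false_iff_not]; exact hdone
    simp only [hfalse, if_neg hdone, if_neg hcond]
    by_cases hk0 : k > 0
    · have h1 : ¬ (kN = 0) := by omega
      have h2 : kN - 1 = (k - 1).toNat := by omega
      have h3 : kN = k.toNat := by omega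
      by_cases hh : h = [] <;> simp [hh, hk0, h1, h2, h3]
    · have h1 : kN = 0 := by omega
      simp [h1, hk0]
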